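-- pv_equiv track=rewrite | github.com/cthiounn/adventofcode-2020-python | day16.py | matcheees2
-- ===== SOURCE A (Python) =====
-- def matcheees2(a,b,c,d,li,exc):
--     li2=[]
--     for i in range(len(li[0])):
--         if i not in exc and matcheees(a,b,c,d,li,i):
--             li2.append(i)
--     if len(li2)==1:
--         return li2[0]
--     return -1
--
-- def matcheees(a,b,c,d,li,index):
--     matche=True
--     for i in li:
--         if not(a<=int(i[index])<=b or c<=int(i[index])<=d):
--             matche=False
--     return matche
-- ===== SOURCE B (Python) =====
-- def matcheees2(a, b, c, d, li, exc):
--     # candidate columns: indices not excluded; then eliminate row by row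
--     cands = [i for i in range(len(li[0])) if i not in exc]
--     for row in li:
--         cands = [i for i in cands
--                  if a <= int(row[i]) <= b or c <= int(row[i]) <= d]
--     return cands[0] if len(cands) == 1 else -1
-- ===== Notes on version B (the rewrite author's own statement) =====
-- stated objective: alternative
-- what changed: Replaces the column-major scan (re-checking every row for each column independently via the helper matcheees) with a row-major elimination that maintains one shrinking list of live candidate columns, filtered once per row.
import Mathlib
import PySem

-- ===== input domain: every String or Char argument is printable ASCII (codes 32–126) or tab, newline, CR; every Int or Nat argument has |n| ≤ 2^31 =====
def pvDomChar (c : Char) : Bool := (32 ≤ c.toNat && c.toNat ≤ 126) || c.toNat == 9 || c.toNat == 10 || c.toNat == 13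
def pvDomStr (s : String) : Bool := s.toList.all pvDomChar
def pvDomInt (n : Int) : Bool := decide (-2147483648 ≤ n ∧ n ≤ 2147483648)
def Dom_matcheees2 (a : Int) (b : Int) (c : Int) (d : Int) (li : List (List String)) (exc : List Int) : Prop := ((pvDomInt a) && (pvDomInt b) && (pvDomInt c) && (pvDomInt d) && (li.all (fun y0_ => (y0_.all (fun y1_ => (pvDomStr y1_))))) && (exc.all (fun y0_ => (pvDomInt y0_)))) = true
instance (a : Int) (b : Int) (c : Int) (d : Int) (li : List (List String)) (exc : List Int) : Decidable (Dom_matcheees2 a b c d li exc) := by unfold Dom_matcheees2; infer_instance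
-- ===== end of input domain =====

-- B replaces A's column-major scan (helper re-checking every row per column) with
-- row-major elimination of a shrinking candidate-column list; objective: alternative.


-- shared by both ports: int(row[i]); exact on Pre_, where the index is in range
-- and the cell parses (outside Pre_ Python A raises and nothing is claimed)
def pvCell (row : List String) (i : Int) : Int :=
  ((PySem.List.pyGet? row i).bind PySem.Int.ofStr?).getD 0

-- ===== PORT A =====
def pvMatcheees (a : Int) (b : Int) (c : Int) (d : Int) (li : List (List String)) (index : Int) : Bool :=
  li.foldl (fun matche i =>
    if ¬ ((a ≤ pvCell i index ∧ pvCell i index ≤ b) ∨ (c ≤ pvCell i index ∧ pvCell i index ≤ d))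
    then false else matche) true

def matcheees2 (a : Int) (b : Int) (c : Int) (d : Int) (li : List (List String)) (exc : List Int) : Int :=
  let li2 := (PySem.List.pyRange 0 ((li.headD []).length : Int) 1).foldl
    (fun li2 i => if i ∉ exc ∧ pvMatcheees a b c d li i = true then li2 ++ [i] else li2) []
  if li2.length = 1 then li2.headD (-1) else -1

-- ===== PORT B =====
def matcheees2_alt (a : Int) (b : Int) (c : Int) (d : Int) (li : List (List String)) (exc : List Int) : Int :=
  let cands0 := (PySem.List.pyRange 0 ((li.headD []).length : Int) 1).filter (fun i => !exc.contains i)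
  let cands := li.foldl (fun cands row =>
    cands.filter (fun i =>
      (decide (a ≤ pvCell row i) && decide (pvCell row i ≤ b)) ||
      (decide (c ≤ pvCell row i) && decide (pvCell row i ≤ d)))) cands0
  match cands with
  | [x] => x
  | _ => -1

-- ===== PRECONDITION & SPEC =====
-- Pre_ excludes exactly the inputs where Python A raises: empty li (IndexError on li[0]),
-- or some non-excluded column index with a missing cell (IndexError) or a cell int() rejects (ValueError).
def Pre_matcheees2 (a : Int) (b : Int) (c : Int) (d : Int) (li : List (List String)) (exc : List Int) : Prop :=
  li ≠ [] ∧ ((List.range (li.headD []).length).all (fun j =>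
    exc.contains (j : Int) ||
    li.all (fun row => (row[j]?.bind PySem.Int.ofStr?).isSome))) = true

instance (a : Int) (b : Int) (c : Int) (d : Int) (li : List (List String)) (exc : List Int) : Decidable (Pre_matcheees2 a b c d li exc) := by unfold Pre_matcheees2; infer_instance

def pvWitness_matcheees2 : Int × Int × Int × Int × List (List String) × List Int :=
  (0, 3, 5, 7, [["1", "9"], ["2", "6"]], [1])

def Spec_matcheees2 (a : Int) (b : Int) (c : Int) (d : Int) (li : List (List String)) (exc : List Int) (out : Int) : Prop := out = matcheees2_alt a b c d li exc
instance (a : Int) (b : Int) (c : Int) (d : Int) (li : List (List String)) (exc : List Int) (out : Int) : Decidable (Spec_matcheees2 a b c d li exc out) := by unfold Spec_matcheees2; infer_instance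

-- ===== CLAIM (what is proved, stated in full; the proofs are below) =====
def Claim_equal_matcheees2 : Prop := ∀ (a : Int) (b : Int) (c : Int) (d : Int) (li : List (List String)) (exc : List Int), Dom_matcheees2 a b c d li exc → Pre_matcheees2 a b c d li exc → Spec_matcheees2 a b c d li exc (matcheees2 a b c d li exc)

-- ===== LEMMAS AND PROOFS =====

-- A's helper fold: sticky-false accumulator = conjunction over all rows
lemma foldl_sticky_false {α : Type} (p : α → Prop) [DecidablePred p] (l : List α) (m0 : Bool) :
    l.foldl (fun m r => if ¬ p r then false else m) m0 = (m0 && l.all (fun r => decide (p r))) := by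
  have hf : (fun (m : Bool) r => if ¬ p r then false else m) = fun m r => decide (p r) && m := by
    funext m r; by_cases hp : p r <;> simp [hp]
  rw [hf]
  induction l generalizing m0 with
  | nil => simp
  | cons h t ih =>
    simp only [List.foldl_cons, List.all_cons]
    rw [ih]
    by_cases hp : p h <;> simp [hp]

-- A's outer loop: append-if accumulation = filter
lemma foldl_append_if_filter {α : Type} (p : α → Prop) [DecidablePred p] (l acc : List α) :
    l.foldl (fun acc i => if p i then acc ++ [i] else acc) acc = acc ++ l.filter (fun i => decide (p i)) := by
  induction l generalizing acc with
  | nil => simp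
  | cons h t ih =>
    by_cases hp : p h <;> simp [hp, ih]

-- B's elimination loop: folding filters over rows = one filter by "all rows"
lemma foldl_filter_all {α β : Type} (g : β → α → Bool) (l : List β) (cs : List α) :
    l.foldl (fun cs row => cs.filter (g row)) cs = cs.filter (fun i => l.all (fun row => g row i)) := by
  induction l generalizing cs with
  | nil => simp
  | cons h t ih =>
    simp only [List.foldl_cons, ih, List.filter_filter, List.all_cons]
    congr 1
    funext i
    rw [Bool.and_comm]

-- 'i not in exc and M' as Python's bool, split into the two ports' forms
lemma decide_notmem_and (exc : List Int) (i : Int) (Y : Bool) :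
    decide (i ∉ exc ∧ Y = true) = (!exc.contains i && Y) := by
  by_cases hm : i ∈ exc <;> cases Y <;> simp [hm]

-- the two result extractions agree on every list
lemma extract_eq (l : List Int) :
    (if l.length = 1 then l.headD (-1) else -1) =
      (match l with | [x] => x | _ => (-1 : Int)) := by
  match l with
  | [] => simp
  | [x] => simp
  | x :: y :: t => simp [List.length_cons]

theorem matcheees2_eq (a b c d : Int) (li : List (List String)) (exc : List Int) :
    matcheees2 a b c d li exc = matcheees2_alt a b c d li exc := by
  simp only [matcheees2, matcheees2_alt, foldl_append_if_filter, foldl_filter_all,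
    List.filter_filter, List.nil_append, extract_eq]
  congr 2
  funext i
  unfold pvMatcheees
  rw [foldl_sticky_false]
  have hall : (li.all fun r => decide (a ≤ pvCell r i ∧ pvCell r i ≤ b ∨ c ≤ pvCell r i ∧ pvCell r i ≤ d)) =
      (li.all fun row => decide (a ≤ pvCell row i) && decide (pvCell row i ≤ b) ||
        decide (c ≤ pvCell row i) && decide (pvCell row i ≤ d)) := by
    simp only [Bool.decide_or, Bool.decide_and]
  rw [hall, decide_notmem_and, Bool.true_and, Bool.and_comm]

-- ===== VERDICT (by name: the statement is the Claim_ definition above) =====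
theorem matcheees2_spec : Claim_equal_matcheees2 := by
  intro a b c d li exc _ _
  unfold Spec_matcheees2
  exact matcheees2_eq a b c d li exc
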